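-- pv_equiv track=rewrite | github.com/omerfazil08/grad_proj_2 | evolution_colab_phase39 (1).py | pack_targets
-- ===== SOURCE A (Python) =====
-- def pack_targets(targets):
--     packed = []
--     for col in targets:
--         val = 0
--         for r, bit in enumerate(col):
--             if bit: val |= (1 << r)
--         packed.append(val)
--     return packed
-- ===== SOURCE B (Python) =====
-- def pack_targets(targets):
--     # Row-major bit-plane sweep: process bit position r across ALL columns at once,
--     # adding the current weight (2**r) to every column whose r-th entry is truthy.
--     depth = max(map(len, targets), default=0)
--     packed = [0] * len(targets)
--     weight = 1
--     for r in range(depth):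
--         packed = [v + (weight if r < len(col) and col[r] else 0)
--                   for v, col in zip(packed, targets)]
--         weight *= 2
--     return packed
-- ===== Notes on version B (the rewrite author's own statement) =====
-- stated objective: alternative
-- what changed: B traverses the data in the transposed order: a row-major bit-plane sweep that, for each bit position r, adds the running weight 2^r simultaneously to every column whose r-th entry is set, instead of A's column-major loop that finishes each column's OR-mask accumulation before moving to the next.
import Mathlib
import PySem

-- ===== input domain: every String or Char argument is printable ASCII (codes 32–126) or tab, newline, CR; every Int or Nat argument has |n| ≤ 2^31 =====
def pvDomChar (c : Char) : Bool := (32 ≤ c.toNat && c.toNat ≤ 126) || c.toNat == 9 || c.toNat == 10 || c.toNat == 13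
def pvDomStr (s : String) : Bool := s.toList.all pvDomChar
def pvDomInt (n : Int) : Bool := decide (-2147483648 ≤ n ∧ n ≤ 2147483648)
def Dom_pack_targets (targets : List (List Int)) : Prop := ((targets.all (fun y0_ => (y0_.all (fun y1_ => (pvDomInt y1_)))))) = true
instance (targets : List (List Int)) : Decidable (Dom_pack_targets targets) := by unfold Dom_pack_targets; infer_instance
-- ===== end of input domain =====

-- B replaces A's column-major OR-mask loop with a row-major bit-plane sweep: for each bit
-- position r it adds the running weight 2^r to every column whose r-th entry is set
-- (an alternative traversal order/decomposition, same cost).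

-- ===== PORT A =====
def pack_targets (targets : List (List Int)) : List Int :=
  targets.foldl
    (fun packed col =>
      packed ++
        [(PySem.List.enumerate col 0).foldl
          (fun (val : Int) (rb : Int × Int) => if rb.2 ≠ 0 then PySem.Int.bor val ((1 : Int) <<< rb.1.toNat) else val) 0])
    []

-- ===== PORT B =====
def pack_targets_alt (targets : List (List Int)) : List Int :=
  -- depth = max(map(len, targets), default=0), ported as a fold of `max` over the lengths
  -- and inlined into range(depth); the loop body:
  -- packed = [v + (weight if r < len(col) and col[r] else 0) for v, col in zip(packed, targets)]; weight *= 2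
  -- (col[r] is guarded in-range by `r < len(col)`, so pyGetD's default is never observed)
  ((PySem.List.pyRange 0 (targets.foldl (fun m c => max m (c.length : Int)) 0) 1).foldl
    (fun (st : List Int × Int) r =>
      (List.zipWith
        (fun v col => v + (if r < (col.length : Int) ∧ PySem.List.pyGetD col r 0 ≠ 0 then st.2 else 0))
        st.1 targets,
       st.2 * 2))
    (List.replicate targets.length 0, 1)).1

-- ===== PRECONDITION & SPEC =====
def Spec_pack_targets (targets : List (List Int)) (out : List Int) : Prop := out = pack_targets_alt targets
instance (targets : List (List Int)) (out : List Int) : Decidable (Spec_pack_targets targets out) := by unfold Spec_pack_targets; infer_instance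

-- ===== CLAIM (what is proved, stated in full; the proofs are below) =====
def Claim_equal_pack_targets : Prop := ∀ (targets : List (List Int)), Dom_pack_targets targets → Spec_pack_targets targets (pack_targets targets)

-- ===== LEMMAS AND PROOFS =====

-- the common reference value of a column: its little-endian binary value
def pvPure (col : List Int) : Int :=
  col.foldr (fun bit val => val * 2 + (if bit ≠ 0 then 1 else 0)) 0

-- ---------- A side ----------

-- OR-ing a fresh power of two into a smaller nonnegative number is addition.
theorem pv_lor_two_pow : ∀ (s : Nat), ∀ v < 2 ^ s, v ||| 2 ^ s = v + 2 ^ s := by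
  intro s
  induction s with
  | zero => intro v hv; interval_cases v; decide
  | succ s ih =>
    intro v hv
    have h2 : v / 2 < 2 ^ (s + 1) / 2 := by omega
    rw [pow_succ] at h2; simp at h2
    have hih := ih (v / 2) h2
    have hb : v = Nat.bit (v % 2 = 1) (v / 2) := by
      simp [Nat.bit]; rcases Nat.decEq (v % 2) 1 with h | h <;> simp [h] <;> omega
    have hp : 2 ^ (s + 1) = Nat.bit false (2 ^ s) := by simp [Nat.bit]; ring
    rw [hb, hp, Nat.lor_bit]
    simp [Nat.bit]
    rcases Nat.decEq (v % 2) 1 with h | h <;> simp [h] <;> omega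

-- the same fact on Int, phrased for A's `val |= (1 << r)` step
theorem pv_bor_shift (v : Int) (s : Nat) (h0 : 0 ≤ v) (h : v < 2 ^ s) :
    PySem.Int.bor v ((1 : Int) <<< s) = v + 2 ^ s := by
  have h1 : (1 : Int) <<< s = ((2 ^ s : Nat) : Int) := by
    rw [Int.shiftLeft_eq]; push_cast; ring
  rw [h1, PySem.Int.bor_of_nonneg h0 (by exact Int.natCast_nonneg _)]
  have hv : v.toNat < 2 ^ s := by
    zify
    rw [Int.toNat_of_nonneg h0]
    exact h
  rw [Int.toNat_natCast, pv_lor_two_pow s v.toNat hv]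
  push_cast
  rw [Int.toNat_of_nonneg h0]

-- invariant of A's inner loop: starting at index s with accumulator 0 ≤ v < 2^s,
-- the loop adds 2^s times the binary value of the rest
theorem pv_innerA (col : List Int) : ∀ (s : Nat) (v : Int), 0 ≤ v → v < 2 ^ s →
    (PySem.List.enumerate col (s : Int)).foldl
      (fun (val : Int) (rb : Int × Int) => if rb.2 ≠ 0 then PySem.Int.bor val ((1 : Int) <<< rb.1.toNat) else val) v
    = v + 2 ^ s * pvPure col := by
  induction col with
  | nil => intro s v _ _; simp [PySem.List.enumerate_nil, pvPure]
  | cons b t ih =>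
    intro s v h0 hlt
    rw [PySem.List.enumerate_cons, List.foldl_cons]
    have hc : (s : Int) + 1 = ((s + 1 : Nat) : Int) := by push_cast; ring
    have hpow : (2 : Int) ^ (s + 1) = 2 ^ s * 2 := by rw [pow_succ]
    by_cases hb : b ≠ 0
    · simp only [Int.toNat_natCast]
      rw [pv_bor_shift v s h0 hlt, if_pos hb, hc,
        ih (s + 1) (v + 2 ^ s) (by positivity) (by rw [hpow]; omega)]
      simp only [pvPure, List.foldr_cons, if_pos hb]
      rw [hpow]; ring
    · simp only [Int.toNat_natCast, if_neg hb]
      rw [hc, ih (s + 1) v h0 (by rw [hpow]; omega)]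
      simp only [pvPure, List.foldr_cons, if_neg hb]
      rw [hpow]; ring

theorem pv_packA (targets : List (List Int)) : pack_targets targets = targets.map pvPure := by
  unfold pack_targets
  rw [PySem.List.foldl_append_singleton_eq_map]
  simp only [List.nil_append]
  refine List.map_congr_left (fun col _ => ?_)
  have h := pv_innerA col 0 0 (by omega) (by norm_num)
  simpa using h

-- ---------- B side ----------

-- adding the k-th bit extends the binary value of the first k entries to the first k+1
theorem pv_take_succ (col : List Int) : ∀ (k : Nat),
    pvPure (col.take (k + 1)) =
      pvPure (col.take k) + (if k < col.length ∧ col.getD k 0 ≠ 0 then 2 ^ k else 0) := by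
  induction col with
  | nil => intro k; simp [pvPure]
  | cons b t ih =>
    intro k
    cases k with
    | zero => simp [pvPure]
    | succ k =>
      simp only [List.take_succ_cons, pvPure, List.foldr_cons]
      have := ih k
      simp only [pvPure] at this
      rw [this]
      simp only [List.getD_cons_succ, List.length_cons]
      have hiff : (k + 1 < t.length + 1 ∧ t.getD k 0 ≠ 0) ↔ (k < t.length ∧ t.getD k 0 ≠ 0) := by
        constructor <;> exact fun ⟨h1, h2⟩ => ⟨by omega, h2⟩
      rw [if_congr hiff rfl rfl]
      split_ifs <;> ring

theorem pv_zipWith_map_left {α β : Type} (f : α → β) (g : β → α → β) (l : List α) :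
    List.zipWith g (l.map f) l = l.map (fun x => g (f x) x) := by
  induction l with
  | nil => rfl
  | cons a t ih => simp [ih]

-- invariant of B's row loop: after rows 0..d-1, each column holds the value of its first d bits
theorem pv_loopB (targets : List (List Int)) : ∀ (d : Nat),
    ((PySem.List.pyRange 0 (d : Int) 1).foldl
      (fun (st : List Int × Int) r =>
        (List.zipWith
          (fun v col => v + (if r < (col.length : Int) ∧ PySem.List.pyGetD col r 0 ≠ 0 then st.2 else 0))
          st.1 targets,
         st.2 * 2))
      (List.replicate targets.length 0, 1))
    = (targets.map (fun col => pvPure (col.take d)), 2 ^ d) := by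
  intro d
  induction d with
  | zero =>
    rw [PySem.List.pyRange_one_eq_nil (by norm_num)]
    simp [pvPure, List.map_const', List.foldl_nil]
  | succ d ih =>
    have hcast : ((d + 1 : Nat) : Int) = (d : Int) + 1 := by push_cast; ring
    rw [hcast, PySem.List.pyRange_one_succ_right (by positivity), List.foldl_append, ih]
    simp only [List.foldl_cons, List.foldl_nil]
    refine Prod.ext ?_ (by simp [pow_succ])
    simp only [pv_zipWith_map_left]
    refine List.map_congr_left (fun col _ => ?_)
    rw [pv_take_succ]
    have hiff : ((d : Int) < (col.length : Int) ∧ PySem.List.pyGetD col (d : Int) 0 ≠ 0)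
        ↔ (d < col.length ∧ col.getD d 0 ≠ 0) := by
      rw [PySem.List.pyGetD_natCast]
      exact and_congr_left (fun _ => by exact_mod_cast Iff.rfl)
    rw [if_congr hiff rfl rfl]

-- the Int fold computing depth is the cast of the Nat max of the lengths
theorem pv_depth_cast (targets : List (List Int)) : ∀ (a : Nat),
    targets.foldl (fun m c => max m (c.length : Int)) (a : Int)
      = ((targets.foldl (fun m c => max m c.length) a : Nat) : Int) := by
  induction targets with
  | nil => intro a; rfl
  | cons h t ih =>
    intro a
    simp only [List.foldl_cons]
    rw [show max (a : Int) ((h.length : Nat) : Int) = ((max a h.length : Nat) : Int) by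
      exact (Nat.cast_max a h.length).symm]
    exact ih _

-- the accumulator of the Nat max-fold never decreases
theorem pv_le_foldl_max (targets : List (List Int)) : ∀ (a : Nat),
    a ≤ targets.foldl (fun m c => max m c.length) a := by
  induction targets with
  | nil => intro a; simp
  | cons h t ih =>
    intro a
    simp only [List.foldl_cons]
    exact le_trans (Nat.le_max_left a h.length) (ih _)

-- every column's length is bounded by the computed depth
theorem pv_len_le_depth (targets : List (List Int)) : ∀ (a : Nat) (col : List Int),
    col ∈ targets → col.length ≤ targets.foldl (fun m c => max m c.length) a := by
  induction targets with
  | nil => intro a col h; cases h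
  | cons h t ih =>
    intro a col hm
    simp only [List.foldl_cons]
    rcases List.mem_cons.mp hm with rfl | hm
    · exact le_trans (Nat.le_max_right a col.length) (pv_le_foldl_max t _)
    · exact ih _ col hm

theorem pv_packB (targets : List (List Int)) : pack_targets_alt targets = targets.map pvPure := by
  unfold pack_targets_alt
  have hd := pv_depth_cast targets 0
  push_cast at hd
  rw [hd, pv_loopB]
  refine List.map_congr_left (fun col hm => ?_)
  rw [List.take_of_length_le (pv_len_le_depth targets 0 col hm)]

-- ===== VERDICT (by name: the statement is the Claim_ definition above) =====
theorem pack_targets_spec : Claim_equal_pack_targets := by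
  intro targets _
  unfold Spec_pack_targets
  rw [pv_packA, pv_packB]
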